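-- pv_equiv track=rewrite | github.com/alxmol/sweproj | training/feature_engineering.py | path_prefix
-- ===== SOURCE A (Python) =====
-- def path_prefix(path: str | None) -> str:
--     """Return a compact path prefix for the corpus path prior table.
--
--     Args:
--         path: Extracted pathname.
--
--     Returns:
--         ``/segment`` or ``/segment/subsegment`` prefix, or an empty string.
--     """
--
--     if not isinstance(path, str) or not path:
--         return ''
--
--     parts = [segment for segment in path.split('/') if segment]
--     if not parts:
--         return ''
--     if len(parts) == 1:
--         return f'/{parts[0]}'
--     return f'/{parts[0]}/{parts[1]}'
-- ===== SOURCE B (Python) =====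
-- def path_prefix(path):
--     """Single-pass character state machine: build the output directly while
--     scanning, counting segment starts, and stop as soon as a third segment
--     begins (instead of splitting the whole path and indexing)."""
--     if not isinstance(path, str) or not path:
--         return ''
--     out = []
--     segs = 0
--     prev_slash = True
--     for ch in path:
--         if ch == '/':
--             prev_slash = True
--         elif prev_slash:
--             segs += 1
--             if segs > 2:
--                 break
--             out.append('/')
--             out.append(ch)
--             prev_slash = False
--         else:
--             out.append(ch)
--     return ''.join(out)
-- ===== Notes on version B (the rewrite author's own statement) =====
-- stated objective: alternative
-- what changed: Replaces split-all-segments-then-filter-then-index with a one-pass character state machine that appends to the output directly and breaks as soon as a third segment starts.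
import Mathlib
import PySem

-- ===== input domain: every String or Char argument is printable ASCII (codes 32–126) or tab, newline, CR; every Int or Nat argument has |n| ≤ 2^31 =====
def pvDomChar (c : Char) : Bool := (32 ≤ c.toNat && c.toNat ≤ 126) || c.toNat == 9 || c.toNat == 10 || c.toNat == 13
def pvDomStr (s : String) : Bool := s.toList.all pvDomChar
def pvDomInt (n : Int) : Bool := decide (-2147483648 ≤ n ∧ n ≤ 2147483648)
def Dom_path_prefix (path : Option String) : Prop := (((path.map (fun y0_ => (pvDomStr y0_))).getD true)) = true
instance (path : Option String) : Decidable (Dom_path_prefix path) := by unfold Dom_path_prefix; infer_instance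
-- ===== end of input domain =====

-- B replaces split/filter/index with a one-pass character state machine building the output directly (alternative; same return value).

-- ===== PORT A =====
def path_prefix (path : Option String) : String :=
  match path with
  | none => ""                                   -- not isinstance(path, str)
  | some p =>
    if p = "" then "" else                       -- not path
    let parts := (PySem.Chars.splitOn p.toList ['/']).filter (fun s => s ≠ [])
    match parts with
    | [] => ""
    | [a] => String.ofList ('/' :: a)
    | a :: b :: _ => String.ofList ('/' :: a ++ '/' :: b)

-- ===== PORT B =====
-- the for-loop of Source B: state (out, segs, prev_slash); 'break' = return out
def pathPrefixLoop : List Char → List Char → Nat → Bool → List Char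
  | [], out, _, _ => out
  | ch :: t, out, segs, prev =>
    if ch = '/' then pathPrefixLoop t out segs true
    else if prev then
      if segs + 1 > 2 then out
      else pathPrefixLoop t (out ++ ['/', ch]) (segs + 1) false
    else pathPrefixLoop t (out ++ [ch]) segs prev

def path_prefix_alt (path : Option String) : String :=
  match path with
  | none => ""
  | some p =>
    if p = "" then ""
    else String.ofList (pathPrefixLoop p.toList [] 0 true)

-- ===== PRECONDITION & SPEC =====
def Spec_path_prefix (path : Option String) (out : String) : Prop := out = path_prefix_alt path
instance (path : Option String) (out : String) : Decidable (Spec_path_prefix path out) := by unfold Spec_path_prefix; infer_instance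

-- ===== CLAIM (what is proved, stated in full; the proofs are below) =====
def Claim_equal_path_prefix : Prop := ∀ (path : Option String), Dom_path_prefix path → Spec_path_prefix path (path_prefix path)

-- ===== LEMMAS AND PROOFS =====

-- the nonempty '/'-separated tokens of a character list
def tok : List Char → List (List Char)
  | [] => []
  | c :: t =>
    if c == '/' then tok t
    else (c :: t.takeWhile (fun d => !(d == '/'))) :: tok (t.dropWhile (fun d => !(d == '/')))
termination_by l => l.length
decreasing_by
  · simp
  · have := List.length_dropWhile_le (fun d => !(d == '/')) t
    simp; omega

-- render at most k tokens as '/tok' pieces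
def emitTok : Nat → List (List Char) → List Char
  | 0, _ => []
  | _ + 1, [] => []
  | k + 1, t :: ts => '/' :: (t ++ emitTok k ts)

-- reference split (Python str.split('/') semantics)
def mySplit (cur : List Char) : List Char → List (List Char)
  | [] => [cur]
  | c :: t => if c == '/' then cur :: mySplit [] t else mySplit (cur ++ [c]) t

lemma go_eq (fuel : Nat) (l cur : List Char) (accs : List (List Char))
    (h : l.length ≤ fuel) :
    PySem.Chars.splitOn.go ['/'] fuel l cur accs = accs.reverse ++ mySplit cur.reverse l := by
  induction fuel generalizing l cur accs with
  | zero =>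
    have hl : l = [] := by cases l <;> simp_all
    subst hl
    simp [PySem.Chars.splitOn.go, mySplit]
  | succ n ih =>
    cases l with
    | nil => simp [PySem.Chars.splitOn.go, mySplit]
    | cons c t =>
      have ht : t.length ≤ n := by simpa using Nat.le_of_succ_le_succ h
      rw [PySem.Chars.splitOn.go]
      by_cases hc : c = '/'
      · subst hc
        rw [if_pos (by simp [List.isPrefixOf])]
        have hstep : List.drop (['/'] : List Char).length ('/' :: t) = t := by simp
        rw [hstep, ih t [] (cur.reverse :: accs) ht]
        simp [mySplit]
      · rw [if_neg (by simp [List.isPrefixOf]; exact fun h' => hc h'.symm)]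
        rw [ih t (c :: cur) accs ht]
        simp [mySplit, hc]

lemma splitOn_eq (l : List Char) : PySem.Chars.splitOn l ['/'] = mySplit [] l := by
  rw [PySem.Chars.splitOn, go_eq (l.length + 1) l [] [] (Nat.le_succ _)]
  simp

lemma mySplit_filter (l cur : List Char) :
    (mySplit cur l).filter (fun s => s ≠ []) =
      if cur = [] then tok l
      else (cur ++ l.takeWhile (fun d => !(d == '/'))) :: tok (l.dropWhile (fun d => !(d == '/'))) := by
  induction l generalizing cur with
  | nil =>
    by_cases h : cur = [] <;> simp [mySplit, h, tok]
  | cons c t ih =>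
    by_cases hc : c = '/'
    · subst hc
      have hm : mySplit cur ('/' :: t) = cur :: mySplit [] t := by simp [mySplit]
      rw [hm, List.filter_cons, ih []]
      have htok : tok ('/' :: t) = tok t := by simp [tok]
      by_cases h : cur = []
      · subst h; simp [htok]
      · simp [h, htok]
    · have hm : mySplit cur (c :: t) = mySplit (cur ++ [c]) t := by
        simp [mySplit, hc]
      rw [hm, ih (cur ++ [c]), if_neg (by simp)]
      have h1 : List.takeWhile (fun d => !(d == '/')) (c :: t)
          = c :: List.takeWhile (fun d => !(d == '/')) t := by simp [hc]
      have h2 : List.dropWhile (fun d => !(d == '/')) (c :: t)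
          = List.dropWhile (fun d => !(d == '/')) t := by simp [hc]
      rw [h1, h2]
      by_cases h : cur = []
      · subst h; simp [tok, hc]
      · simp [h]

-- the loop of B computes out ++ (up to 2 - segs rendered tokens of the rest)
lemma pathPrefixLoop_eq :
    ∀ (l : List Char) (out : List Char) (segs : Nat), segs ≤ 2 →
      (pathPrefixLoop l out segs true = out ++ emitTok (2 - segs) (tok l)) ∧
      (pathPrefixLoop l out segs false =
        out ++ l.takeWhile (fun d => !(d == '/'))
            ++ emitTok (2 - segs) (tok (l.dropWhile (fun d => !(d == '/'))))) := by
  intro l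
  induction l with
  | nil =>
    intro out segs _
    constructor <;> simp [pathPrefixLoop, tok] <;> cases h : 2 - segs <;> simp [emitTok]
  | cons c t ih =>
    intro out segs hs
    by_cases hc : c = '/'
    · subst hc
      constructor
      · simpa [pathPrefixLoop, tok] using (ih out segs hs).1
      · simpa [pathPrefixLoop, tok] using (ih out segs hs).1
    · constructor
      · by_cases hbig : segs + 1 > 2
        · have h2 : segs = 2 := by omega
          subst h2
          simp [pathPrefixLoop, hc, hbig, emitTok]
        · have hs1 : segs + 1 ≤ 2 := by omega
          have h2 := (ih (out ++ ['/', c]) (segs + 1) hs1).2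
          have hk : 2 - segs = (2 - (segs + 1)) + 1 := by omega
          have e : pathPrefixLoop (c :: t) out segs true
              = pathPrefixLoop t (out ++ ['/', c]) (segs + 1) false := by
            simp [pathPrefixLoop, hc, hbig]
          rw [e, h2, hk]
          simp [tok, hc, emitTok]
      · have h2 := (ih (out ++ [c]) segs hs).2
        have e : pathPrefixLoop (c :: t) out segs false
            = pathPrefixLoop t (out ++ [c]) segs false := by
          simp [pathPrefixLoop, hc]
        rw [e, h2]
        simp [hc]

-- ===== VERDICT (by name: the statement is the Claim_ definition above) =====
theorem path_prefix_spec : Claim_equal_path_prefix := by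
  intro path _
  unfold Spec_path_prefix path_prefix path_prefix_alt
  cases path with
  | none => rfl
  | some p =>
    by_cases hp : p = ""
    · simp [hp]
    simp only [hp, if_false]
    rw [splitOn_eq, mySplit_filter, if_pos rfl,
        (pathPrefixLoop_eq p.toList [] 0 (by omega)).1]
    rcases tok p.toList with _ | ⟨a, _ | ⟨b, rest⟩⟩ <;> simp [emitTok]
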